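-- pv_equiv track=rewrite | github.com/velociroger-pb/Mandalorion | utils/removePolyA_simulatedReads.py | removePolyA
-- ===== SOURCE A (Python) =====
-- def removePolyA(seq):
--     reverse = seq[::-1]
--     Astate, Astretch, Vstretch, trimPos , Astart = False, 0, 0, 0, 0
--     for pos in range(0, len(reverse), 1):
--         base = reverse[pos]
--         if not Astate:
--             if base == 'A':
--                 Astretch += 1
--                 if Astretch == 6:
--                     Astate = True
--                     lastA = pos
--                     Astart = pos
--             else:
--                 Astretch=0
--         if Astate:
--             if base != 'A':
--                 Vstretch += 1
--                 Astretch = 0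
--             else:
--                 Astretch += 1
--                 if Astretch >= 3:
--                     Vstretch = 0
--                     lastA = pos
--             if Vstretch >= 3:
--                 trimPos = lastA
--                 break
--     reverseTrim = reverse[trimPos:]
--     seqTrim = reverseTrim[::-1]
--     return seqTrim, Astate, Astart,trimPos
-- ===== SOURCE B (Python) =====
-- def removePolyA(seq):
--     # Run-length encode the reversed read, then decide everything at run level
--     # (runs of A's / non-A's) instead of per character.
--     rev = seq[::-1]
--     n = len(rev)
--     runs = []
--     i = 0
--     while i < n:
--         j = i + 1
--         while j < n and (rev[j] == 'A') == (rev[i] == 'A'):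
--             j += 1
--         runs.append((rev[i] == 'A', i, j - i))
--         i = j
--     # first A-run of length >= 6 triggers the poly-A state
--     trigger = None
--     for k in range(len(runs)):
--         isA, start, length = runs[k]
--         if isA and length >= 6:
--             trigger = start + 5
--             lastA = start + length - 1
--             tail = runs[k + 1:]
--             break
--     if trigger is None:
--         return seq, False, 0, 0
--     # run-level scan: an A-run of >= 3 resets the mismatch budget and moves lastA
--     # to its end; non-A runs consume the budget (3 mismatches since last reset)
--     v = 0
--     trimPos = 0
--     for isA, start, length in tail:
--         if isA:
--             if length >= 3:
--                 v = 0
--                 lastA = start + length - 1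
--         else:
--             if v + length >= 3:
--                 trimPos = lastA
--                 break
--             v += length
--     return seq[:n - trimPos], True, trigger, trimPos
-- ===== Notes on version B (the rewrite author's own statement) =====
-- stated objective: alternative
-- what changed: Replaces A's per-character state machine (Astate flag, Astretch/Vstretch counters updated once per base) by a run-length-encoding algorithm: the reversed read is first compressed into maximal runs of A / non-A, the poly-A trigger is the first A-run of length >= 6, and the trim position is decided by a scan over whole runs (an A-run >= 3 resets the mismatch budget, a non-A run consumes it) instead of over characters.
import Mathlib
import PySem

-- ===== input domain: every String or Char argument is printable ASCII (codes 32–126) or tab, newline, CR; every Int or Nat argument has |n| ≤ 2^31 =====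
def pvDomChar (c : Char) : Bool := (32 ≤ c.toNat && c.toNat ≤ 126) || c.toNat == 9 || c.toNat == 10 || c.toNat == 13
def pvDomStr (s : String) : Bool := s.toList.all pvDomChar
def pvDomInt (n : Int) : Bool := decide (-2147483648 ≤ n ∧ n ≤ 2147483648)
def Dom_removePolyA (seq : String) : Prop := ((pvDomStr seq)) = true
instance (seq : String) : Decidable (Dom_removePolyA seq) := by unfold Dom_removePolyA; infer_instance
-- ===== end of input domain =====

-- B replaces A's per-character state machine by run-length encoding of the reversed read
-- followed by a scan over whole runs (objective: alternative algorithm, same cost).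

-- ===== PORT A =====
-- A's 'for pos in range(0, len(reverse), 1)' with break, reading reverse[pos], is the obvious
-- structural recursion consuming the reversed char list while counting pos. State order:
-- (Astate, Astretch, Vstretch, trimPos, Astart, lastA); lastA is only read after Astate is set,
-- so passing 0 initially is faithful. Returns (Astate, Astart, trimPos).
def removePolyA_loop : List Char → Int → Bool → Int → Int → Int → Int → Int → Bool × Int × Int
  | [], _, Astate, _, _, trimPos, Astart, _ => (Astate, Astart, trimPos)
  | base :: rest, pos, Astate, Astretch, Vstretch, trimPos, Astart, lastA =>
    -- 'if not Astate: …' block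
    match (if !Astate then
             (if base = 'A' then
                (if Astretch + 1 = 6 then (true, Astretch + 1, pos, pos)
                 else (Astate, Astretch + 1, Astart, lastA))
              else (Astate, (0 : Int), Astart, lastA))
           else (Astate, Astretch, Astart, lastA) : Bool × Int × Int × Int) with
    | (Astate1, Astretch1, Astart1, lastA1) =>
      -- 'if Astate: …' block (runs in the SAME iteration when Astate was just set)
      if Astate1 then
        match (if base ≠ 'A' then (Vstretch + 1, (0 : Int), lastA1)
               else if Astretch1 + 1 ≥ 3 then ((0 : Int), Astretch1 + 1, pos)
               else (Vstretch, Astretch1 + 1, lastA1) : Int × Int × Int) with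
        | (Vstretch2, Astretch2, lastA2) =>
          if Vstretch2 ≥ 3 then (Astate1, Astart1, lastA2)   -- trimPos = lastA; break
          else removePolyA_loop rest (pos + 1) Astate1 Astretch2 Vstretch2 trimPos Astart1 lastA2
      else removePolyA_loop rest (pos + 1) Astate1 Astretch1 Vstretch trimPos Astart1 lastA1

def removePolyA (seq : String) : String × Bool × Int × Int :=
  -- reverse = seq[::-1]
  let reverse : List Char := seq.toList.reverse
  match removePolyA_loop reverse 0 false 0 0 0 0 0 with
  | (Astate, Astart, trimPos) =>
    -- reverseTrim = reverse[trimPos:]; seqTrim = reverseTrim[::-1]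
    (String.ofList (PySem.List.slice reverse (some trimPos) none).reverse, Astate, Astart, trimPos)

-- ===== PORT B =====
-- Source B run-length encodes the reversed read: the inner 'while j < n and …' that advances j
-- over characters of the same A-ness is rendered by takeWhile/dropWhile on the remaining
-- characters (exact: it counts exactly the chars d with (d=='A') == (rev[i]=='A')).
def polyA_runs : List Char → Int → List (Bool × Int × Int)
  | [], _ => []
  | c :: rest, pos =>
      ((c == 'A'), pos, 1 + ((rest.takeWhile (fun d => (d == 'A') == (c == 'A'))).length : Int)) ::
        polyA_runs (rest.dropWhile (fun d => (d == 'A') == (c == 'A')))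
          (pos + 1 + ((rest.takeWhile (fun d => (d == 'A') == (c == 'A'))).length : Int))
termination_by l _ => l.length
decreasing_by
  have := List.length_dropWhile_le (fun d => (d == 'A') == (c == 'A')) rest
  simp only [List.length_cons]
  omega

-- Source B's 'for k in range(len(runs)): … break' finding the first A-run of length >= 6;
-- returns (trigger, lastA, tail runs).
def polyA_findTrigger : List (Bool × Int × Int) → Option (Int × Int × List (Bool × Int × Int))
  | [] => none
  | (isA, start, len) :: rs =>
      if isA = true ∧ 6 ≤ len then some (start + 5, start + len - 1, rs)
      else polyA_findTrigger rs

-- Source B's 'for isA, start, length in tail: … break' run-level scan; returns trimPos.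
def polyA_scanRuns : List (Bool × Int × Int) → Int → Int → Int
  | [], _, _ => 0
  | (isA, start, len) :: rs, lastA, v =>
      if isA = true then
        if 3 ≤ len then polyA_scanRuns rs (start + len - 1) 0
        else polyA_scanRuns rs lastA v
      else
        if 3 ≤ v + len then lastA
        else polyA_scanRuns rs lastA (v + len)

def removePolyA_alt (seq : String) : String × Bool × Int × Int :=
  let rev : List Char := seq.toList.reverse
  match polyA_findTrigger (polyA_runs rev 0) with
  | none => (seq, false, 0, 0)
  | some (t, la, rs) =>
      let trim := polyA_scanRuns rs la 0
      -- seq[:n - trimPos]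
      (String.ofList (PySem.List.slice seq.toList none (some ((seq.toList.length : Int) - trim))),
        true, t, trim)

-- ===== PRECONDITION & SPEC =====
def Spec_removePolyA (seq : String) (out : String × Bool × Int × Int) : Prop := out = removePolyA_alt seq
instance (seq : String) (out : String × Bool × Int × Int) : Decidable (Spec_removePolyA seq out) := by unfold Spec_removePolyA; infer_instance

-- ===== CLAIM (what is proved, stated in full; the proofs are below) =====
def Claim_equal_removePolyA : Prop := ∀ (seq : String), Dom_removePolyA seq → Spec_removePolyA seq (removePolyA seq)

-- ===== LEMMAS AND PROOFS =====

-- Proof-only character-level intermediates: pass 1 finds the first run of 6 A's (returning its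
-- position and the unscanned remainder), pass 2 the trim position. A's loop is proved equal to
-- them (phase1/phase2), and they in turn equal B's run-level functions (trig_scan/pass2_scan).
def polyA_pass1 : List Char → Int → Int → Option (Int × List Char)
  | [], _, _ => none
  | c :: rest, pos, run =>
    if c = 'A' then
      if run + 1 = 6 then some (pos, rest) else polyA_pass1 rest (pos + 1) (run + 1)
    else polyA_pass1 rest (pos + 1) 0

def polyA_pass2 : List Char → Int → Int → Int → Int → Int
  | [], _, _, _, _ => 0
  | c :: rest, pos, lastA, arun, vrun =>
    if c = 'A' then
      if arun + 1 ≥ 3 then polyA_pass2 rest (pos + 1) pos (arun + 1) 0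
      else polyA_pass2 rest (pos + 1) lastA (arun + 1) vrun
    else
      if vrun + 1 = 3 then lastA
      else polyA_pass2 rest (pos + 1) lastA 0 (vrun + 1)

-- Phase 2: once Astate is set, A's loop (with trimPos = 0) computes exactly polyA_pass2.
lemma phase2 (rest : List Char) : ∀ (pos A0 L a a' v : Int),
    ((3 ≤ a ∧ 3 ≤ a') ∨ a = a') → 0 ≤ v → v < 3 →
    removePolyA_loop rest pos true a v 0 A0 L = (true, A0, polyA_pass2 rest pos L a' v) := by
  induction rest with
  | nil => intro pos A0 L a a' v hrel h0 h3; simp [removePolyA_loop, polyA_pass2]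
  | cons c rest ih =>
      intro pos A0 L a a' v hrel h0 h3
      by_cases hc : c = 'A'
      · simp only [removePolyA_loop, polyA_pass2, hc, Bool.not_true, Bool.false_eq_true,
          if_false, if_true, ne_eq, not_true_eq_false]
        rcases hrel with ⟨h1, h2⟩ | rfl
        · rw [if_pos (show a + 1 ≥ 3 by omega), if_pos (show a' + 1 ≥ 3 by omega)]
          simpa [show ¬ ((0:Int) ≥ 3) by omega] using
            ih (pos + 1) A0 pos (a + 1) (a' + 1) 0 (Or.inl ⟨by omega, by omega⟩) le_rfl (by omega)
        · by_cases ha : a + 1 ≥ 3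
          · rw [if_pos ha]
            simpa [show ¬ ((0:Int) ≥ 3) by omega, ha] using
              ih (pos + 1) A0 pos (a + 1) (a + 1) 0 (Or.inr rfl) le_rfl (by omega)
          · rw [if_neg ha]
            simpa [show ¬ (v ≥ 3) by omega, ha] using
              ih (pos + 1) A0 L (a + 1) (a + 1) v (Or.inr rfl) h0 h3
      · simp only [removePolyA_loop, polyA_pass2, hc, Bool.not_true, Bool.false_eq_true,
          if_false, if_true, ne_eq, not_false_eq_true]
        by_cases hv : v + 1 ≥ 3
        · rw [if_pos hv, if_pos (show v + 1 = 3 by omega)]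
        · rw [if_neg hv, if_neg (show ¬ (v + 1 = 3) by omega)]
          simpa using ih (pos + 1) A0 L 0 0 (v + 1) (Or.inr rfl) (by omega) (by omega)

-- Phase 1: before Astate is set, A's loop is polyA_pass1 followed by polyA_pass2.
lemma phase1 (l : List Char) : ∀ (pos run L : Int),
    removePolyA_loop l pos false run 0 0 0 L =
      match polyA_pass1 l pos run with
      | none => (false, 0, 0)
      | some (p, rest) => (true, p, polyA_pass2 rest (p + 1) p 6 0) := by
  induction l with
  | nil => intro pos run L; simp [removePolyA_loop, polyA_pass1]
  | cons c l ih =>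
      intro pos run L
      by_cases hc : c = 'A'
      · by_cases h6 : run + 1 = 6
        · norm_num [removePolyA_loop, polyA_pass1, hc, h6]
          exact phase2 l (pos + 1) pos pos 7 6 0 (Or.inl ⟨by norm_num, by norm_num⟩) le_rfl
            (by norm_num)
        · norm_num [removePolyA_loop, polyA_pass1, hc, h6]
          exact ih (pos + 1) (run + 1) L
      · norm_num [removePolyA_loop, polyA_pass1, hc]
        exact ih (pos + 1) 0 L

lemma pass2_bounds (rest : List Char) : ∀ (pos L a v : Int), 0 ≤ L → L < pos →
    0 ≤ polyA_pass2 rest pos L a v ∧ polyA_pass2 rest pos L a v < pos + rest.length := by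
  induction rest with
  | nil => intro pos L a v h0 h1; simp [polyA_pass2]; omega
  | cons c rest ih =>
      intro pos L a v h0 h1
      simp only [polyA_pass2, List.length_cons]
      split_ifs with hc ha hv
      · have := ih (pos + 1) pos (a + 1) 0 (by omega) (by omega); push_cast; push_cast at this; constructor <;> omega
      · have := ih (pos + 1) L (a + 1) v h0 (by omega); push_cast; push_cast at this; constructor <;> omega
      · push_cast; omega
      · have := ih (pos + 1) L 0 (v + 1) h0 (by omega); push_cast; push_cast at this; constructor <;> omega

lemma pass1_some (l : List Char) : ∀ (pos run p : Int) (rest : List Char),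
    polyA_pass1 l pos run = some (p, rest) → pos ≤ p ∧ p + 1 + rest.length = pos + l.length := by
  induction l with
  | nil => intro pos run p rest h; simp [polyA_pass1] at h
  | cons c l ih =>
      intro pos run p rest h
      simp only [polyA_pass1] at h
      split_ifs at h with hc h6
      · simp only [Option.some.injEq, Prod.mk.injEq] at h
        obtain ⟨rfl, rfl⟩ := h
        simp only [List.length_cons]; push_cast; omega
      · have := ih (pos + 1) (run + 1) p rest h
        simp only [List.length_cons]; push_cast at this ⊢; omega
      · have := ih (pos + 1) 0 p rest h
        simp only [List.length_cons]; push_cast at this ⊢; omega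

-- head of a dropWhile fails the predicate
lemma dropWhile_head_false (p : Char → Bool) (l : List Char) (c : Char) (rest : List Char)
    (h : l.dropWhile p = c :: rest) : p c = false := by
  induction l with
  | nil => simp [List.dropWhile] at h
  | cons d l ih =>
      rw [List.dropWhile_cons] at h
      by_cases hd : p d = true
      · rw [if_pos hd] at h; exact ih h
      · rw [if_neg hd] at h
        cases h; simpa using hd

-- pass1 over a block of non-A characters
lemma pass1_nonA (blk : List Char) : ∀ (rest : List Char) (pos r : Int), (∀ c ∈ blk, c ≠ 'A') →
    polyA_pass1 (blk ++ rest) pos r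
      = polyA_pass1 rest (pos + blk.length) (if blk.isEmpty then r else 0) := by
  induction blk with
  | nil => intro rest pos r _; simp
  | cons c blk ih =>
      intro rest pos r hall
      have hc : ¬ (c = 'A') := hall c (by simp)
      simp only [List.cons_append, polyA_pass1, hc, if_false]
      rw [ih rest (pos + 1) 0 (fun d hd => hall d (by simp [hd]))]
      have : pos + 1 + (blk.length : Int) = pos + ((c :: blk).length : Int) := by
        simp only [List.length_cons]; push_cast; ring
      rw [this]
      simp [List.isEmpty]

-- pass1 over a block of A characters
lemma pass1_A (blk : List Char) : ∀ (rest : List Char) (pos r : Int), (∀ c ∈ blk, c = 'A') →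
    0 ≤ r → r < 6 →
    polyA_pass1 (blk ++ rest) pos r
      = if 6 ≤ r + (blk.length : Int) then some (pos + 5 - r, blk.drop (6 - r).toNat ++ rest)
        else polyA_pass1 rest (pos + blk.length) (r + blk.length) := by
  induction blk with
  | nil =>
      intro rest pos r _ h0 h6
      simp only [List.length_nil, Nat.cast_zero, List.nil_append]
      rw [if_neg (by omega)]
      simp
  | cons c blk ih =>
      intro rest pos r hall h0 h6
      have hc : c = 'A' := hall c List.mem_cons_self
      subst hc
      have hall' : ∀ d ∈ blk, d = 'A' := fun d hd => hall d (List.mem_cons_of_mem _ hd)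
      rw [List.cons_append,
        show polyA_pass1 ('A' :: (blk ++ rest)) pos r
          = if r + 1 = 6 then some (pos, blk ++ rest)
            else polyA_pass1 (blk ++ rest) (pos + 1) (r + 1) from by simp [polyA_pass1]]
      simp only [List.length_cons, Nat.cast_add, Nat.cast_one]
      by_cases h1 : r + 1 = 6
      · rw [if_pos h1, if_pos (by omega)]
        have hr : r = 5 := by omega
        subst hr
        have hdrop : ((6 : Int) - 5).toNat = 1 := by norm_num
        rw [hdrop]
        norm_num
      · rw [if_neg h1, ih rest (pos + 1) (r + 1) hall' (by omega) (by omega)]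
        by_cases h2 : 6 ≤ r + ((blk.length : Int) + 1)
        · rw [if_pos (by omega), if_pos h2]
          have e2 : ((6 : Int) - r).toNat = ((6 : Int) - (r + 1)).toNat + 1 := by omega
          rw [e2, List.drop_succ_cons]
          have e1 : pos + 1 + 5 - (r + 1) = pos + 5 - r := by ring
          rw [e1]
        · rw [if_neg (by omega), if_neg h2]
          have e1 : pos + 1 + (blk.length : Int) = pos + ((blk.length : Int) + 1) := by ring
          have e2 : r + 1 + (blk.length : Int) = r + ((blk.length : Int) + 1) := by ring
          rw [e1, e2]

-- pass1 is insensitive to the incoming run count when the list is empty or starts with non-A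
lemma pass1_reset (l : List Char) (pos r r' : Int)
    (h : match l with | [] => True | c :: _ => c ≠ 'A') :
    polyA_pass1 l pos r = polyA_pass1 l pos r' := by
  cases l with
  | nil => rfl
  | cons c rest => simp only at h; simp [polyA_pass1, h]

-- pass2 over a block of A characters
lemma pass2_A (blk : List Char) : ∀ (rest : List Char) (pos lastA a v : Int),
    (∀ c ∈ blk, c = 'A') → 0 ≤ a →
    polyA_pass2 (blk ++ rest) pos lastA a v
      = if 1 ≤ (blk.length : Int) ∧ 3 ≤ a + (blk.length : Int)
        then polyA_pass2 rest (pos + blk.length) (pos + blk.length - 1) (a + blk.length) 0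
        else polyA_pass2 rest (pos + blk.length) lastA (a + blk.length) v := by
  induction blk with
  | nil =>
      intro rest pos lastA a v _ h0
      simp only [List.length_nil, Nat.cast_zero, List.nil_append]
      rw [if_neg (by omega)]
      simp
  | cons c blk ih =>
      intro rest pos lastA a v hall h0
      have hc : c = 'A' := hall c List.mem_cons_self
      subst hc
      have hall' : ∀ d ∈ blk, d = 'A' := fun d hd => hall d (List.mem_cons_of_mem _ hd)
      rw [List.cons_append,
        show polyA_pass2 ('A' :: (blk ++ rest)) pos lastA a v
          = if a + 1 ≥ 3 then polyA_pass2 (blk ++ rest) (pos + 1) pos (a + 1) 0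
            else polyA_pass2 (blk ++ rest) (pos + 1) lastA (a + 1) v from by simp [polyA_pass2]]
      simp only [List.length_cons, Nat.cast_add, Nat.cast_one]
      by_cases h3 : a + 1 ≥ 3
      · rw [if_pos h3, ih rest (pos + 1) pos (a + 1) 0 hall' (by omega)]
        by_cases hb : 1 ≤ (blk.length : Int)
        · rw [if_pos ⟨hb, by omega⟩, if_pos ⟨by omega, by omega⟩]
          have e1 : pos + 1 + (blk.length : Int) = pos + ((blk.length : Int) + 1) := by ring
          have e2 : a + 1 + (blk.length : Int) = a + ((blk.length : Int) + 1) := by ring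
          rw [e1, e2]
        · have hbnil : blk = [] := List.length_eq_zero_iff.mp (by omega)
          subst hbnil
          simp only [List.length_nil, Nat.cast_zero, List.nil_append]
          rw [if_neg (by norm_num), if_pos ⟨by norm_num, by omega⟩]
          norm_num
      · rw [if_neg h3, ih rest (pos + 1) lastA (a + 1) v hall' (by omega)]
        by_cases h2 : 1 ≤ (blk.length : Int) ∧ 3 ≤ a + 1 + (blk.length : Int)
        · rw [if_pos h2, if_pos ⟨by omega, by omega⟩]
          have e1 : pos + 1 + (blk.length : Int) = pos + ((blk.length : Int) + 1) := by ring
          have e2 : a + 1 + (blk.length : Int) = a + ((blk.length : Int) + 1) := by ring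
          rw [e1, e2]
        · rw [if_neg h2,
            if_neg (by rintro ⟨x, y⟩; rcases not_and_or.mp h2 with h | h <;> omega)]
          have e1 : pos + 1 + (blk.length : Int) = pos + ((blk.length : Int) + 1) := by ring
          have e2 : a + 1 + (blk.length : Int) = a + ((blk.length : Int) + 1) := by ring
          rw [e1, e2]

-- pass2 over a block of non-A characters
lemma pass2_nonA (blk : List Char) : ∀ (rest : List Char) (pos lastA a v : Int),
    (∀ c ∈ blk, c ≠ 'A') → 0 ≤ v → v < 3 →
    polyA_pass2 (blk ++ rest) pos lastA a v
      = if 3 ≤ v + (blk.length : Int) then lastA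
        else polyA_pass2 rest (pos + blk.length) lastA (if blk.isEmpty then a else 0)
              (v + blk.length) := by
  induction blk with
  | nil =>
      intro rest pos lastA a v _ h0 h3
      simp only [List.length_nil, Nat.cast_zero, List.isEmpty_nil]
      rw [if_neg (by omega)]
      simp
  | cons c blk ih =>
      intro rest pos lastA a v hall h0 h3
      have hc : ¬ (c = 'A') := hall c List.mem_cons_self
      have hall' : ∀ d ∈ blk, d ≠ 'A' := fun d hd => hall d (List.mem_cons_of_mem _ hd)
      rw [List.cons_append,
        show polyA_pass2 (c :: (blk ++ rest)) pos lastA a v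
          = if v + 1 = 3 then lastA
            else polyA_pass2 (blk ++ rest) (pos + 1) lastA 0 (v + 1) from by
              simp [polyA_pass2, hc]]
      simp only [List.length_cons, Nat.cast_add, Nat.cast_one, List.isEmpty_cons]
      by_cases hv : v + 1 = 3
      · rw [if_pos hv, if_pos (show (3:Int) ≤ v + ((blk.length : Int) + 1) from by omega)]
      · rw [if_neg hv, ih rest (pos + 1) lastA 0 (v + 1) hall' (by omega) (by omega)]
        by_cases h2 : 3 ≤ v + 1 + (blk.length : Int)
        · rw [if_pos h2, if_pos (show (3:Int) ≤ v + ((blk.length : Int) + 1) from by omega)]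
        · rw [if_neg h2, if_neg (show ¬ (3:Int) ≤ v + ((blk.length : Int) + 1) from by omega)]
          have e1 : pos + 1 + (blk.length : Int) = pos + ((blk.length : Int) + 1) := by ring
          have e2 : v + 1 + (blk.length : Int) = v + ((blk.length : Int) + 1) := by ring
          rw [e1, e2]
          simp

-- pass 2 equals B's run-level scan, at any run boundary
lemma pass2_scan : ∀ (n : Nat) (l : List Char), l.length ≤ n → ∀ (pos lastA a v : Int),
    0 ≤ v → v < 3 → 0 ≤ a →
    (a = 0 ∨ match l with | [] => True | c :: _ => c ≠ 'A') →
    polyA_pass2 l pos lastA a v = polyA_scanRuns (polyA_runs l pos) lastA v := by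
  intro n
  induction n with
  | zero =>
      intro l hl pos lastA a v _ _ _ _
      have : l = [] := List.eq_nil_of_length_eq_zero (Nat.le_zero.mp hl)
      subst this
      simp [polyA_pass2, polyA_runs, polyA_scanRuns]
  | succ n ih =>
      intro l hl pos lastA a v hv0 hv3 ha0 hbound
      cases l with
      | nil => simp [polyA_pass2, polyA_runs, polyA_scanRuns]
      | cons c rest =>
        set p : Char → Bool := fun d => (d == 'A') == (c == 'A') with hp
        set M : Int := ((rest.takeWhile p).length : Int) with hM
        have hM0 : 0 ≤ M := by rw [hM]; exact Int.natCast_nonneg _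
        have hsplit : rest.takeWhile p ++ rest.dropWhile p = rest := List.takeWhile_append_dropWhile
        have hlen : (rest.dropWhile p).length ≤ n := by
          have := List.length_dropWhile_le p rest
          simp only [List.length_cons] at hl; omega
        have htw : ∀ d ∈ rest.takeWhile p, p d = true := fun d hd => List.mem_takeWhile_imp hd
        have hdecomp : c :: rest = (c :: rest.takeWhile p) ++ rest.dropWhile p := by
          simp [hsplit]
        have hK : (((c :: rest.takeWhile p)).length : Int) = 1 + M := by
          rw [hM]; simp only [List.length_cons]; push_cast; ring
        rw [show polyA_runs (c :: rest) pos
              = ((c == 'A'), pos, 1 + M) ::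
                polyA_runs (rest.dropWhile p) (pos + 1 + M)
            from by rw [polyA_runs]]
        by_cases hc : c = 'A'
        · -- A-run; the boundary hypothesis forces a = 0
          have ha : a = 0 := by
            rcases hbound with h | h
            · exact h
            · simp only at h; exact absurd hc h
          subst ha
          have hallA : ∀ d ∈ (c :: rest.takeWhile p), d = 'A' := by
            intro d hd
            rcases List.mem_cons.mp hd with rfl | hd'
            · exact hc
            · have := htw d hd'
              simp only [hp, hc] at this
              simpa using this
          have hdwA : match rest.dropWhile p with | [] => True | d :: _ => d ≠ 'A' := by
            cases hdrop : rest.dropWhile p with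
            | nil => trivial
            | cons d ds =>
                have := dropWhile_head_false p rest d ds hdrop
                simp only [hp, hc] at this
                simpa using this
          rw [hdecomp, pass2_A _ _ _ _ _ _ hallA le_rfl, hK,
            show polyA_scanRuns (((c == 'A'), pos, 1 + M) ::
                polyA_runs (rest.dropWhile p) (pos + 1 + M)) lastA v
              = if 3 ≤ 1 + M then
                  polyA_scanRuns (polyA_runs (rest.dropWhile p) (pos + 1 + M)) (pos + (1 + M) - 1) 0
                else polyA_scanRuns (polyA_runs (rest.dropWhile p) (pos + 1 + M)) lastA v
              from by simp [polyA_scanRuns, hc]]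
          by_cases h3 : 3 ≤ 1 + M
          · rw [if_pos (show (1:Int) ≤ 1 + M ∧ 3 ≤ 0 + (1 + M) from ⟨by omega, by omega⟩),
              if_pos h3,
              ih (rest.dropWhile p) hlen _ _ _ _ le_rfl (by omega) (by omega) (Or.inr hdwA),
              show pos + (1 + M) = pos + 1 + M from by ring]
          · rw [if_neg (show ¬ ((1:Int) ≤ 1 + M ∧ 3 ≤ 0 + (1 + M)) from by
                rintro ⟨x, y⟩; omega),
              if_neg h3,
              ih (rest.dropWhile p) hlen _ _ _ _ hv0 hv3 (by omega) (Or.inr hdwA),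
              show pos + (1 + M) = pos + 1 + M from by ring]
        · -- non-A run
          have hcb : (c == 'A') = false := by simpa using hc
          have hallN : ∀ d ∈ (c :: rest.takeWhile p), d ≠ 'A' := by
            intro d hd
            rcases List.mem_cons.mp hd with rfl | hd'
            · exact hc
            · have := htw d hd'
              simp only [hp, hcb] at this
              simpa using this
          rw [hdecomp, pass2_nonA _ _ _ _ _ _ hallN hv0 hv3, hK,
            show polyA_scanRuns (((c == 'A'), pos, 1 + M) ::
                polyA_runs (rest.dropWhile p) (pos + 1 + M)) lastA v
              = if 3 ≤ v + (1 + M) then lastA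
                else polyA_scanRuns (polyA_runs (rest.dropWhile p) (pos + 1 + M)) lastA (v + (1 + M))
              from by simp [polyA_scanRuns, hcb]]
          simp only [List.isEmpty_cons, Bool.false_eq_true, if_false]
          by_cases h3 : 3 ≤ v + (1 + M)
          · rw [if_pos h3, if_pos h3]
          · rw [if_neg h3, if_neg h3,
              ih (rest.dropWhile p) hlen _ _ _ _ (by omega) (by omega) le_rfl (Or.inl rfl),
              show pos + (1 + M) = pos + 1 + M from by ring]

-- the full character-level result equals the full run-level result
lemma trig_scan : ∀ (n : Nat) (l : List Char), l.length ≤ n → ∀ (pos : Int),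
    (match polyA_pass1 l pos 0 with
     | none => ((false : Bool), (0 : Int), (0 : Int))
     | some (p, rc) => (true, p, polyA_pass2 rc (p + 1) p 6 0))
    = (match polyA_findTrigger (polyA_runs l pos) with
     | none => (false, 0, 0)
     | some (t, la, rs) => (true, t, polyA_scanRuns rs la 0)) := by
  intro n
  induction n with
  | zero =>
      intro l hl pos
      have : l = [] := List.eq_nil_of_length_eq_zero (Nat.le_zero.mp hl)
      subst this
      simp [polyA_pass1, polyA_runs, polyA_findTrigger]
  | succ n ih =>
      intro l hl pos
      cases l with
      | nil => simp [polyA_pass1, polyA_runs, polyA_findTrigger]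
      | cons c rest =>
        set p : Char → Bool := fun d => (d == 'A') == (c == 'A') with hp
        set M : Int := ((rest.takeWhile p).length : Int) with hM
        have hM0 : 0 ≤ M := by rw [hM]; exact Int.natCast_nonneg _
        have hsplit : rest.takeWhile p ++ rest.dropWhile p = rest := List.takeWhile_append_dropWhile
        have hlen : (rest.dropWhile p).length ≤ n := by
          have := List.length_dropWhile_le p rest
          simp only [List.length_cons] at hl; omega
        have htw : ∀ d ∈ rest.takeWhile p, p d = true := fun d hd => List.mem_takeWhile_imp hd
        have hdecomp : c :: rest = (c :: rest.takeWhile p) ++ rest.dropWhile p := by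
          simp [hsplit]
        have hK : (((c :: rest.takeWhile p)).length : Int) = 1 + M := by
          rw [hM]; simp only [List.length_cons]; push_cast; ring
        rw [show polyA_runs (c :: rest) pos
              = ((c == 'A'), pos, 1 + M) ::
                polyA_runs (rest.dropWhile p) (pos + 1 + M)
            from by rw [polyA_runs]]
        by_cases hc : c = 'A'
        · have hallA : ∀ d ∈ (c :: rest.takeWhile p), d = 'A' := by
            intro d hd
            rcases List.mem_cons.mp hd with rfl | hd'
            · exact hc
            · have := htw d hd'
              simp only [hp, hc] at this
              simpa using this
          have hdwA : match rest.dropWhile p with | [] => True | d :: _ => d ≠ 'A' := by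
            cases hdrop : rest.dropWhile p with
            | nil => trivial
            | cons d ds =>
                have := dropWhile_head_false p rest d ds hdrop
                simp only [hp, hc] at this
                simpa using this
          rw [hdecomp, pass1_A _ _ _ _ hallA le_rfl (by omega), hK]
          by_cases h6 : 6 ≤ (0:Int) + (1 + M)
          · rw [if_pos h6,
              show polyA_findTrigger (((c == 'A'), pos, 1 + M) ::
                  polyA_runs (rest.dropWhile p) (pos + 1 + M))
                = some (pos + 5, pos + (1 + M) - 1, polyA_runs (rest.dropWhile p) (pos + 1 + M))
              from by
                simp only [polyA_findTrigger]
                rw [if_pos ⟨by simp [hc], by omega⟩]]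
            dsimp only
            have hdropA : ∀ d ∈ (c :: rest.takeWhile p).drop ((6 - (0:Int)).toNat), d = 'A' :=
              fun d hd => hallA d (List.mem_of_mem_drop hd)
            rw [pass2_A _ _ _ _ _ _ hdropA (by omega)]
            have hdlen : ((((c :: rest.takeWhile p)).drop ((6 - (0:Int)).toNat)).length : Int)
                = 1 + M - 6 := by
              simp only [List.length_drop]
              omega
            rw [hdlen]
            by_cases hD : 1 ≤ 1 + M - 6
            · rw [if_pos ⟨hD, by omega⟩,
                pass2_scan n (rest.dropWhile p) hlen _ _ _ _ le_rfl (by omega) (by omega)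
                  (Or.inr hdwA),
                show pos + 5 - 0 + 1 + (1 + M - 6) = pos + 1 + M from by ring]
              rw [show pos + 1 + M - 1 = pos + (1 + M) - 1 from by ring,
                show pos + 5 - 0 = pos + 5 from by ring]
            · rw [if_neg (show ¬ ((1:Int) ≤ 1 + M - 6 ∧ 3 ≤ 6 + (1 + M - 6)) from by
                  rintro ⟨x, y⟩; omega),
                pass2_scan n (rest.dropWhile p) hlen _ _ _ _ le_rfl (by omega) (by omega)
                  (Or.inr hdwA),
                show pos + 5 - 0 + 1 + (1 + M - 6) = pos + 1 + M from by omega,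
                show pos + 5 - 0 = pos + (1 + M) - 1 from by omega]
              rw [show pos + (1 + M) - 1 = pos + 5 from by omega]
          · rw [if_neg h6,
              pass1_reset (rest.dropWhile p) _ _ 0 hdwA,
              show pos + (1 + M) = pos + 1 + M from by ring,
              show polyA_findTrigger (((c == 'A'), pos, 1 + M) ::
                  polyA_runs (rest.dropWhile p) (pos + 1 + M))
                = polyA_findTrigger (polyA_runs (rest.dropWhile p) (pos + 1 + M))
              from by
                simp only [polyA_findTrigger]
                rw [if_neg (by rintro ⟨x, y⟩; omega)]]
            exact ih (rest.dropWhile p) hlen _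
        · have hcb : (c == 'A') = false := by simpa using hc
          have hallN : ∀ d ∈ (c :: rest.takeWhile p), d ≠ 'A' := by
            intro d hd
            rcases List.mem_cons.mp hd with rfl | hd'
            · exact hc
            · have := htw d hd'
              simp only [hp, hcb] at this
              simpa using this
          rw [hdecomp, pass1_nonA _ _ _ _ hallN, hK]
          simp only [List.isEmpty_cons, Bool.false_eq_true, if_false]
          rw [show pos + (1 + M) = pos + 1 + M from by ring,
            show polyA_findTrigger (((c == 'A'), pos, 1 + M) ::
                polyA_runs (rest.dropWhile p) (pos + 1 + M))
              = polyA_findTrigger (polyA_runs (rest.dropWhile p) (pos + 1 + M))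
            from by
              simp only [polyA_findTrigger]
              rw [if_neg (by rintro ⟨x, y⟩; rw [hcb] at x; exact Bool.false_ne_true x)]]
          exact ih (rest.dropWhile p) hlen _

-- ===== VERDICT (by name: the statement is the Claim_ definition above) =====
theorem removePolyA_spec : Claim_equal_removePolyA := by
  intro seq _
  unfold Spec_removePolyA removePolyA removePolyA_alt
  dsimp only
  rw [phase1]
  have hts := trig_scan (seq.toList.reverse.length) seq.toList.reverse le_rfl 0
  cases hp : polyA_pass1 seq.toList.reverse 0 0 with
  | none =>
      rw [hp] at hts
      cases ht : polyA_findTrigger (polyA_runs seq.toList.reverse 0) with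
      | none =>
          simp [PySem.List.slice_zero_start, PySem.List.slice_none_none]
      | some tr =>
          obtain ⟨t, la, rs⟩ := tr
          rw [ht] at hts
          simp at hts
  | some pr =>
      obtain ⟨pp, rc⟩ := pr
      rw [hp] at hts
      cases ht : polyA_findTrigger (polyA_runs seq.toList.reverse 0) with
      | none =>
          rw [ht] at hts; simp at hts
      | some tr =>
          obtain ⟨t, la, rs⟩ := tr
          rw [ht] at hts
          simp only [Prod.mk.injEq, true_and] at hts
          obtain ⟨htp, hscan⟩ := hts
          obtain ⟨hpp0, hlenrel⟩ := pass1_some _ _ _ _ _ hp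
          obtain ⟨ht0, htlt⟩ := pass2_bounds rc (pp + 1) pp 6 0 (by omega) (by omega)
          simp only
          rw [← htp, ← hscan]
          set T := polyA_pass2 rc (pp + 1) pp 6 0 with hT
          have htle : T ≤ (seq.toList.length : Int) := by
            simp only [List.length_reverse] at hlenrel; omega
          rw [PySem.List.slice_from _ ht0,
            PySem.List.slice_to seq.toList (show (0:Int) ≤ (seq.toList.length : Int) - T by omega)]
          rw [List.drop_reverse, List.reverse_reverse]
          have hnat : seq.toList.length - T.toNat = ((seq.toList.length : Int) - T).toNat := by omega
          rw [hnat]
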